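-- pv_equiv track=rewrite | github.com/ankit2872/careq | careq/backend/triage.py | get_triage_score
-- ===== SOURCE A (Python) =====
-- from typing import List, Tuple
--
-- SYMPTOM_SEVERITY = {
--     "critical": {"shortness of breath": 8, "chest pain": 7, "severe pain": 7, "difficulty breathing": 8, "unconsciousness": 10, "sudden weakness": 7},
--     "urgent": {"fever": 4, "persistent cough": 3, "abdominal pain": 5, "headache with fever": 5, "vomiting": 3, "diarrhea": 3, "dizziness": 4},
--     "stable": {"headache": 2, "nausea": 2, "mild pain": 2, "sore throat": 1, "runny nose": 1}
-- }
--
-- def get_triage_score(symptoms: List[str], age: int) -> int: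
--     """
--     Calculates a triage score based on symptoms and age.
--     Higher score means higher severity.
--     """
--     score = 0
--     normalized_symptoms = [s.lower().strip() for s in symptoms]
--
--     # Age-based scoring (adjusted for more impact)
--     if age < 1: # Infants
--         score += 5
--     elif age < 18: # Children/Adolescents
--         score += 2
--     elif age >= 65: # Elderly
--         score += 4
--
--     # Symptom-based scoring with weights
--     for category, symptom_map in SYMPTOM_SEVERITY.items():
--         for known_symptom, base_score in symptom_map.items():
--             if known_symptom in normalized_symptoms:
--                 score += base_score
--
--     # Rule-based combinations (examples - expand as needed)
--     if "chest pain" in normalized_symptoms and "shortness of breath" in normalized_symptoms: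
--         score += 5 # Significantly increase score for combination
--     if "fever" in normalized_symptoms and "headache" in normalized_symptoms:
--         score += 2
--     if "severe pain" in normalized_symptoms and (age < 5 or age > 75):
--         score += 3 # Vulnerable age groups with severe pain
--
--     # Ensure score doesn't go below zero
--     return max(0, score)
-- ===== SOURCE B (Python) =====
-- FLAT_SEVERITY = {
--     "shortness of breath": 8, "chest pain": 7, "severe pain": 7, "difficulty breathing": 8,
--     "unconsciousness": 10, "sudden weakness": 7,
--     "fever": 4, "persistent cough": 3, "abdominal pain": 5, "headache with fever": 5,
--     "vomiting": 3, "diarrhea": 3, "dizziness": 4,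
--     "headache": 2, "nausea": 2, "mild pain": 2, "sore throat": 1, "runny nose": 1,
-- }
--
-- # combination rules as data: (required symptoms, optional (lo, hi) age window whose
-- # OUTSIDE triggers the rule, bonus points)
-- COMBO_RULES = [
--     (["chest pain", "shortness of breath"], None, 5),
--     (["fever", "headache"], None, 2),
--     (["severe pain"], (5, 75), 3),
-- ]
--
-- AGE_BRACKETS = [(1, 5), (18, 2)]
--
-- def _age_points(age):
--     for limit, pts in AGE_BRACKETS:
--         if age < limit:
--             return pts
--     return 4 if age >= 65 else 0
--
-- def get_triage_score(symptoms, age):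
--     present = {s.lower().strip() for s in symptoms}
--     total = _age_points(age)
--     total += sum(FLAT_SEVERITY.get(s, 0) for s in present)
--     for needed, window, bonus in COMBO_RULES:
--         if all(n in present for n in needed) and (window is None or age < window[0] or age > window[1]):
--             total += bonus
--     return max(0, total)
-- ===== Notes on version B (the rewrite author's own statement) =====
-- stated objective: alternative
-- what changed: Replaces A's nested scan over three category dicts and its hard-coded if-chains by a data-driven design: one flat symptom-to-score dict looked up once per distinct normalized symptom (a set), an age-bracket table scanned by a helper, and a table of combination rules (required symptoms + optional age window) folded over instead of three literal ifs.
import Mathlib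
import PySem

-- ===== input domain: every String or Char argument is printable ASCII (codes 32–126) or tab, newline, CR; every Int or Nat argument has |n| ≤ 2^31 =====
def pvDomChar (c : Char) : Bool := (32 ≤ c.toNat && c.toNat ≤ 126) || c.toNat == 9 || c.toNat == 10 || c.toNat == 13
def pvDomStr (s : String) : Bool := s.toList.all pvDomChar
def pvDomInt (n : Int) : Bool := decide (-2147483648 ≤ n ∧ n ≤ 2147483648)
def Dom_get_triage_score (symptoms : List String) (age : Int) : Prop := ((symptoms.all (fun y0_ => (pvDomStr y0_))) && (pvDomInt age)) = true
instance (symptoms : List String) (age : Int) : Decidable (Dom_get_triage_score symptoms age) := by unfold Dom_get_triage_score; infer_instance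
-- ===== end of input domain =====

-- B is data-driven: a flat symptom→score dict looked up once per distinct normalized symptom,
-- an age-bracket table scanned by a helper, and a fold over a table of combination rules
-- replacing A's nested category scan and hard-coded if-chains; objective: alternative.

-- ===== PORT A =====
-- SYMPTOM_SEVERITY: dict of dicts, ported as an association list in insertion order
def symptomSeverity : List (String × List (String × Int)) :=
  [("critical", [("shortness of breath", 8), ("chest pain", 7), ("severe pain", 7),
                 ("difficulty breathing", 8), ("unconsciousness", 10), ("sudden weakness", 7)]),
   ("urgent",   [("fever", 4), ("persistent cough", 3), ("abdominal pain", 5),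
                 ("headache with fever", 5), ("vomiting", 3), ("diarrhea", 3), ("dizziness", 4)]),
   ("stable",   [("headache", 2), ("nausea", 2), ("mild pain", 2), ("sore throat", 1), ("runny nose", 1)])]

def get_triage_score (symptoms : List String) (age : Int) : Int :=
  let score0 : Int := 0
  let normalized := symptoms.map (fun s => PySem.Str.strip (PySem.Str.lower s))
  -- age-based scoring
  let score1 : Int :=
    if age < 1 then score0 + 5
    else if age < 18 then score0 + 2
    else if age ≥ 65 then score0 + 4
    else score0
  -- symptom-based scoring: for category, symptom_map in SYMPTOM_SEVERITY.items(): for known, base in …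
  let score2 : Int := symptomSeverity.foldl
    (fun acc cat => cat.2.foldl
      (fun a p => if p.1 ∈ normalized then a + p.2 else a) acc) score1
  -- rule-based combinations
  let score3 : Int := if "chest pain" ∈ normalized ∧ "shortness of breath" ∈ normalized then score2 + 5 else score2
  let score4 : Int := if "fever" ∈ normalized ∧ "headache" ∈ normalized then score3 + 2 else score3
  let score5 : Int := if "severe pain" ∈ normalized ∧ (age < 5 ∨ age > 75) then score4 + 3 else score4
  max 0 score5

-- ===== PORT B =====
def flatSeverity : PySem.Dict String Int := PySem.Dict.mk
  [("shortness of breath", 8), ("chest pain", 7), ("severe pain", 7), ("difficulty breathing", 8),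
   ("unconsciousness", 10), ("sudden weakness", 7),
   ("fever", 4), ("persistent cough", 3), ("abdominal pain", 5), ("headache with fever", 5),
   ("vomiting", 3), ("diarrhea", 3), ("dizziness", 4),
   ("headache", 2), ("nausea", 2), ("mild pain", 2), ("sore throat", 1), ("runny nose", 1)]

-- (required symptoms, optional (lo, hi) age window whose OUTSIDE triggers the rule, bonus)
def comboRules : List (List String × Option (Int × Int) × Int) :=
  [(["chest pain", "shortness of breath"], none, 5),
   (["fever", "headache"], none, 2),
   (["severe pain"], some (5, 75), 3)]

def ageBrackets : List (Int × Int) := [(1, 5), (18, 2)]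

def agePoints (age : Int) : List (Int × Int) → Int
  | [] => if age ≥ 65 then 4 else 0
  | (limit, pts) :: rest => if age < limit then pts else agePoints age rest

def get_triage_score_alt (symptoms : List String) (age : Int) : Int :=
  let present : PySem.Set String :=
    PySem.Set.ofList (symptoms.map (fun s => PySem.Str.strip (PySem.Str.lower s)))
  let total0 : Int := agePoints age ageBrackets
  -- sum(FLAT_SEVERITY.get(s, 0) for s in present); order-independent consumption of the set
  let total1 : Int := total0 + (present.map (fun s => flatSeverity.getD s 0)).sum
  -- for needed, window, bonus in COMBO_RULES: …
  let total2 : Int := comboRules.foldl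
    (fun acc r =>
      if (r.1.all (fun n => decide (n ∈ present)) &&
          (match r.2.1 with
           | none => true
           | some w => decide (age < w.1 ∨ age > w.2))) = true
      then acc + r.2.2 else acc) total1
  max 0 total2

-- ===== PRECONDITION & SPEC =====
def Spec_get_triage_score (symptoms : List String) (age : Int) (out : Int) : Prop := out = get_triage_score_alt symptoms age
instance (symptoms : List String) (age : Int) (out : Int) : Decidable (Spec_get_triage_score symptoms age out) := by unfold Spec_get_triage_score; infer_instance

-- ===== CLAIM (what is proved, stated in full; the proofs are below) =====
def Claim_equal_get_triage_score : Prop := ∀ (symptoms : List String) (age : Int), Dom_get_triage_score symptoms age → Spec_get_triage_score symptoms age (get_triage_score symptoms age)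

-- ===== LEMMAS AND PROOFS =====

-- an accumulate-if fold is the start plus a sum of indicators
lemma fold_if_sum (P : List (String × Int)) (L : List String) (c : Int) :
    P.foldl (fun a p => if p.1 ∈ L then a + p.2 else a) c
      = c + (P.map (fun p => if p.1 ∈ L then p.2 else 0)).sum := by
  have h : (fun (a : Int) (p : String × Int) => if p.1 ∈ L then a + p.2 else a)
      = fun a p => a + (if p.1 ∈ L then p.2 else 0) := by
    funext a p; split <;> simp
  rw [h, PySem.List.foldl_add]

lemma ind_sum (L : List String) (k : String) (v : Int) (h : L.Nodup) :
    (L.map (fun s => if s = k then v else 0)).sum = if k ∈ L then v else 0 := by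
  induction L with
  | nil => simp
  | cons a t ih =>
    rcases List.nodup_cons.mp h with ⟨ha, ht⟩
    by_cases hak : a = k
    · subst hak
      simp [ih ht, ha]
    · have : ¬ k = a := fun e => hak e.symm
      simp [hak, this, ih ht]

lemma getD_mk_cons (k : String) (v : Int) (rest : List (String × Int)) (s : String) :
    (PySem.Dict.mk ((k, v) :: rest)).getD s 0
      = if k = s then v else (PySem.Dict.mk rest).getD s 0 := by
  simp [PySem.Dict.getD, PySem.Dict.get?_mk_cons, beq_iff_eq]
  split <;> simp

lemma getD_not_mem (T : List (String × Int)) (k : String) (h : k ∉ T.map Prod.fst) :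
    (PySem.Dict.mk T).getD k 0 = 0 := by
  induction T with
  | nil => simp [PySem.Dict.getD, PySem.Dict.get?]
  | cons p t ih =>
    obtain ⟨a, b⟩ := p
    simp only [List.map_cons, List.mem_cons, not_or] at h
    rw [getD_mk_cons]
    have hne : ¬ a = k := fun e => h.1 e.symm
    simp [hne, ih h.2]

-- double counting: summing dict lookups over a duplicate-free list equals
-- summing each dict value gated by membership
lemma core (T : List (String × Int)) (L : List String) (hL : L.Nodup)
    (hT : (T.map Prod.fst).Nodup) :
    (L.map (fun s => (PySem.Dict.mk T).getD s 0)).sum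
      = (T.map (fun p => if p.1 ∈ L then p.2 else 0)).sum := by
  induction T with
  | nil => simp [PySem.Dict.getD, PySem.Dict.get?]
  | cons p t ih =>
    obtain ⟨k, v⟩ := p
    simp only [List.map_cons, List.nodup_cons] at hT
    have hpt : ∀ s, (PySem.Dict.mk ((k, v) :: t)).getD s 0
        = (if s = k then v else 0) + (PySem.Dict.mk t).getD s 0 := by
      intro s
      rw [getD_mk_cons]
      by_cases h : k = s
      · subst h; simp [getD_not_mem t k hT.1]
      · have : ¬ s = k := fun e => h e.symm
        simp [h, this]
    calc (L.map (fun s => (PySem.Dict.mk ((k, v) :: t)).getD s 0)).sum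
        = (L.map (fun s => (if s = k then v else 0) + (PySem.Dict.mk t).getD s 0)).sum := by
          simp only [hpt]
      _ = (L.map (fun s => if s = k then v else 0)).sum
            + (L.map (fun s => (PySem.Dict.mk t).getD s 0)).sum := by
          rw [← List.sum_map_add]
      _ = (if k ∈ L then v else 0) + (t.map (fun p => if p.1 ∈ L then p.2 else 0)).sum := by
          rw [ind_sum L k v hL, ih hT.2]
      _ = (((k, v) :: t).map (fun p => if p.1 ∈ L then p.2 else 0)).sum := by
          simp

-- ===== VERDICT (by name: the statement is the Claim_ definition above) =====
theorem get_triage_score_spec : Claim_equal_get_triage_score := by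
  intro symptoms age _
  unfold Spec_get_triage_score get_triage_score get_triage_score_alt
  generalize symptoms.map (fun s => PySem.Str.strip (PySem.Str.lower s)) = norm
  have hA : ∀ c : Int, symptomSeverity.foldl
      (fun acc cat => cat.2.foldl (fun a p => if p.1 ∈ norm then a + p.2 else a) acc) c
      = c + (flatSeverity.items.map (fun p => if p.1 ∈ norm then p.2 else 0)).sum := by
    intro c
    simp only [symptomSeverity, List.foldl_cons, List.foldl_nil, fold_if_sum, flatSeverity,
      List.map_cons, List.map_nil, List.sum_cons, List.sum_nil]
    ring
  have hB : ((PySem.Set.ofList norm).map (fun s => flatSeverity.getD s 0)).sum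
      = (flatSeverity.items.map (fun p => if p.1 ∈ norm then p.2 else 0)).sum := by
    rw [show flatSeverity = PySem.Dict.mk flatSeverity.items from rfl,
      core flatSeverity.items (PySem.Set.ofList norm) (PySem.Set.nodup_ofList norm) (by decide)]
    simp only [PySem.Set.mem_ofList]
  simp only [hA, hB, PySem.Set.mem_ofList, comboRules, ageBrackets, agePoints,
    List.foldl_cons, List.foldl_nil, List.all_cons, List.all_nil, Bool.and_true,
    Bool.and_eq_true, decide_eq_true_eq]
  generalize (flatSeverity.items.map (fun p => if p.1 ∈ norm then p.2 else 0)).sum = S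
  by_cases h1 : "chest pain" ∈ norm <;> by_cases h2 : "shortness of breath" ∈ norm <;>
    by_cases h3 : "fever" ∈ norm <;> by_cases h4 : "headache" ∈ norm <;>
    by_cases h5 : "severe pain" ∈ norm <;>
    simp only [h1, h2, h3, h4, h5, if_true, if_false, and_true, true_and, and_false,
      false_and] <;>
    split_ifs <;> omega
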